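-- pv_equiv track=rewrite | github.com/rjk79/Data-Structures-Algorithms-System-Design | anagram_difference.py | anagramDiff
-- ===== SOURCE A (Python) =====
-- import collections
--
-- def anagramDiff(str1, str2):
--     res = 0
--     aCount = collections.Counter(str1)
--     bCount = collections.Counter(str2)
--     for char in aCount.keys():
--         if char in bCount.keys():
--             if aCount[char] > bCount[char]:
--                 res += abs(aCount[char] - bCount[char])
--         else:
--             res += aCount[char]
--     return res
-- ===== SOURCE B (Python) =====
-- def anagramDiff(str1, str2):
--     # Multiset removal, no counting: cross off one occurrence of each char of
--     # str2 from the pool of str1's characters; the leftovers are str1's excess.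
--     rest = list(str1)
--     for ch in str2:
--         try:
--             rest.remove(ch)
--         except ValueError:
--             pass
--     return len(rest)
-- ===== Notes on version B (the rewrite author's own statement) =====
-- stated objective: alternative
-- what changed: Drops Counter entirely: B removes one occurrence of each str2 character from a pool of str1's characters and returns the leftover length, instead of comparing per-character counts.
import Mathlib
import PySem

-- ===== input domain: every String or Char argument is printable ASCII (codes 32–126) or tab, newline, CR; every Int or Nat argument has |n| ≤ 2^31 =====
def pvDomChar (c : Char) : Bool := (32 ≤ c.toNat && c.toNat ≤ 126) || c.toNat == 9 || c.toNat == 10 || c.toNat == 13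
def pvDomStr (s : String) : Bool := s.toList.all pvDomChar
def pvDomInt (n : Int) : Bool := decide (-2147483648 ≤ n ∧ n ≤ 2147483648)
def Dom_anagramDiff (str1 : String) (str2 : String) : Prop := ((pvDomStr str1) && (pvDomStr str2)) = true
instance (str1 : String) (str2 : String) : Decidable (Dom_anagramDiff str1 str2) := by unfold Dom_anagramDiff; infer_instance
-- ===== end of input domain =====

-- B drops Counter: it removes one occurrence of each str2 character from a pool of str1's characters and returns the leftover length (alternative algorithm; same result).


-- ===== PORT A =====
def anagramDiff (str1 : String) (str2 : String) : Int :=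
  let aCount := PySem.Dict.counter str1.toList
  let bCount := PySem.Dict.counter str2.toList
  aCount.keys.foldl (fun res char =>
    if bCount.contains char then
      if aCount.getD char 0 > bCount.getD char 0 then
        res + |aCount.getD char 0 - bCount.getD char 0|
      else res
    else res + aCount.getD char 0) 0

-- ===== PORT B =====
-- 'rest.remove(ch)' inside try/except ValueError: remove the first occurrence
-- if present, otherwise leave the list unchanged (= (remove? r c).getD r).
def anagramDiff_alt (str1 : String) (str2 : String) : Int :=
  let rest := str2.toList.foldl (fun r c => (PySem.List.remove? r c).getD r) str1.toList
  (rest.length : Int)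

-- ===== PRECONDITION & SPEC =====
def Spec_anagramDiff (str1 : String) (str2 : String) (out : Int) : Prop := out = anagramDiff_alt str1 str2
instance (str1 : String) (str2 : String) (out : Int) : Decidable (Spec_anagramDiff str1 str2 out) := by unfold Spec_anagramDiff; infer_instance

-- ===== CLAIM (what is proved, stated in full; the proofs are below) =====
def Claim_equal_anagramDiff : Prop := ∀ (str1 : String) (str2 : String), Dom_anagramDiff str1 str2 → Spec_anagramDiff str1 str2 (anagramDiff str1 str2)

-- ===== LEMMAS AND PROOFS =====

-- B's removal loop only ever erases elements, so its result is a sublist of the pool.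
theorem removeFold_sublist : ∀ (s2 rest : List Char),
    (s2.foldl (fun r c => (PySem.List.remove? r c).getD r) rest).Sublist rest := by
  intro s2
  induction s2 with
  | nil => intro rest; simp
  | cons c t ih =>
    intro rest
    rw [List.foldl_cons]
    refine (ih _).trans ?_
    by_cases hc : c ∈ rest
    · rw [PySem.List.remove?_eq_some_erase _ _ hc]
      exact List.erase_sublist
    · rw [(PySem.List.remove?_eq_none_iff _ _).2 hc]
      simp

-- Count of each character after B's removal loop.
theorem removeFold_count : ∀ (s2 rest : List Char) (k : Char),
    (s2.foldl (fun r c => (PySem.List.remove? r c).getD r) rest).count k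
      = rest.count k - min (rest.count k) (s2.count k) := by
  intro s2
  induction s2 with
  | nil => intro rest k; simp
  | cons c t ih =>
    intro rest k
    rw [List.foldl_cons]
    by_cases hc : c ∈ rest
    · rw [PySem.List.remove?_eq_some_erase _ _ hc]
      rw [Option.getD_some, ih, List.count_erase, List.count_cons]
      have h1 : 1 ≤ rest.count c := List.count_pos_iff.2 hc
      by_cases hk : k = c
      · subst hk; simp only [BEq.rfl, if_true]; omega
      · have h3 : (c == k) = false := by simp [Ne.symm hk]
        simp only [h3, Bool.false_eq_true, if_false]; omega
    · rw [(PySem.List.remove?_eq_none_iff _ _).2 hc, Option.getD_none, ih, List.count_cons]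
      by_cases hk : k = c
      · subst hk
        have h0 : rest.count k = 0 := List.count_eq_zero.2 hc
        simp only [BEq.rfl, if_true]; omega
      · have h3 : (c == k) = false := by simp [Ne.symm hk]
        simp only [h3, Bool.false_eq_true, if_false]; omega

theorem sum_map_add_nat {α : Type} (f g : α → Nat) :
    ∀ (l : List α), (l.map (fun x => f x + g x)).sum = (l.map f).sum + (l.map g).sum := by
  intro l
  induction l with
  | nil => simp
  | cons a t ih => simp [ih]; ring

theorem sum_map_ite_eq_count_nat (a : Char) :
    ∀ (ks : List Char), (ks.map (fun k => if k == a then 1 else 0)).sum = ks.count a := by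
  intro ks
  induction ks with
  | nil => simp
  | cons b t ih =>
    rw [List.map_cons, List.sum_cons, ih, List.count_cons]
    by_cases h : b = a
    · subst h; simp; omega
    · have h1 : (b == a) = false := by simp [h]
      have h2 : (a == b) = false := by simp [Ne.symm h]
      simp [h1]

-- Summing the per-character counts over a duplicate-free list covering l gives l's length.
theorem sum_counts_eq_length :
    ∀ (l ks : List Char), ks.Nodup → (∀ x ∈ l, x ∈ ks) →
      (ks.map (fun k => l.count k)).sum = l.length := by
  intro l
  induction l with
  | nil => intro ks _ _; simp
  | cons a t ih =>
    intro ks hnd hmem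
    have : (ks.map (fun k => (a :: t).count k)).sum
        = (ks.map (fun k => t.count k)).sum + (ks.map (fun k => if k == a then 1 else 0)).sum := by
      rw [← sum_map_add_nat]
      apply congrArg
      apply List.map_congr_left
      intro k _
      rw [List.count_cons]
      by_cases h : k = a
      · subst h; simp
      · simp [h, Ne.symm h]
    rw [this, ih ks hnd (fun x hx => hmem x (List.mem_cons_of_mem _ hx)),
        sum_map_ite_eq_count_nat]
    have ha : a ∈ ks := hmem a List.mem_cons_self
    have h1 : 1 ≤ ks.count a := List.count_pos_iff.2 ha
    have h2 : ks.count a ≤ 1 := List.nodup_iff_count_le_one.1 hnd a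
    simp; omega

-- ===== VERDICT (by name: the statement is the Claim_ definition above) =====
theorem anagramDiff_spec : Claim_equal_anagramDiff := by
  intro str1 str2 _
  unfold Spec_anagramDiff anagramDiff anagramDiff_alt
  dsimp only
  set s1 := str1.toList
  set s2 := str2.toList
  set final := s2.foldl (fun r c => (PySem.List.remove? r c).getD r) s1 with hfinal
  -- B side: length of the leftover pool = sum over distinct chars of leftover counts
  have hmem : ∀ x ∈ final, x ∈ PySem.Set.ofList s1 := by
    intro x hx
    exact (PySem.Set.mem_ofList s1 x).2 ((removeFold_sublist s2 s1).mem hx)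
  have hlen : ((PySem.Set.ofList s1).map (fun k => final.count k)).sum = final.length :=
    sum_counts_eq_length final _ (PySem.Set.nodup_ofList s1) hmem
  rw [← hlen, Nat.cast_list_sum, List.map_map]
  -- A side: the loop adds a per-key amount
  rw [PySem.Dict.keys_counter,
      PySem.List.foldl_congr_mem (PySem.Set.ofList s1) _
        (fun res k => res +
          (if ((PySem.Dict.counter s2).contains k : Bool)
           then (if (PySem.Dict.counter s1).getD k 0 > (PySem.Dict.counter s2).getD k 0
                 then |(PySem.Dict.counter s1).getD k 0 - (PySem.Dict.counter s2).getD k 0| else 0)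
           else (PySem.Dict.counter s1).getD k 0)) 0
        (by intro acc x _; dsimp only; split_ifs <;> ring),
      PySem.List.foldl_add]
  simp only [zero_add]
  -- per-key equality
  apply congrArg
  apply List.map_congr_left
  intro k hk
  have hk1 : k ∈ s1 := (PySem.Set.mem_ofList s1 k).1 hk
  have hc1 : 1 ≤ s1.count k := List.count_pos_iff.2 hk1
  rw [PySem.Dict.contains_counter, PySem.Dict.getD_counter, PySem.Dict.getD_counter,
      Function.comp_apply, removeFold_count]
  by_cases h2 : k ∈ s2
  · have hcont : s2.contains k = true := by simpa using h2
    rw [hcont]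
    simp only [if_true]
    split_ifs with hgt
    · rw [abs_of_nonneg (by omega)]
      omega
    · omega
  · have hc2 : s2.count k = 0 := List.count_eq_zero.2 h2
    have hcont : s2.contains k = false := by simpa using h2
    rw [hcont]
    simp only [Bool.false_eq_true, if_false, hc2]
    omega
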